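-- pv_equiv track=rewrite | github.com/DerikBortoletto/odootest | odoo_addons/customers/TrackTraceRx-TTR2/ttrx2_connector_spt_mrp/connector/service.py | get_list_param
-- ===== SOURCE A (Python) =====
-- METHOD_POST = 'POST'
--
-- METHOD_LIST = 'LIST'
--
-- URI = {
--     'identifiers_types': 'products/identifiers_types',
--     'res.partner': 'trading_partners/{uuid}',
--     'license.spt.partner': 'trading_partners/{partner_uuid}/licences/{id}',
--     'license.spt.location': 'locations/{location_uuid}/licences/{id}',
--     'license.spt.address': 'address_book/{address_uuid}/licences/{id}',
--     'license.types.management.spt': 'company_management/licences_type/{id}',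
--     'license.attachments.spt.partner': 'trading_partners/{partner_uuid}/licences/{licence_id}/attachments{attachment_id}',
--     'license.attachments.spt.location': 'location/{location_uuid}/licences/{licence_id}/attachments{attachment_id}',
--     'license.attachments.spt.address': 'addresss_book/{address_uuid}/licences/{licence_id}/attachments{attachment_id}',
--     'trading.partner.address.spt.partner': 'trading_partners/{partner_uuid}/addresses/{uuid}',
--     'trading.partner.address.spt.location': 'locations/{location_uuid}/addresses/{uuid}',
--     'trading.partner.address.spt.manufacturer': 'company_management/manufacturer/{manufacturer_id}/addresses/{uuid}',
--     'trading.partner.users.spt': 'trading_partners/{partner_uuid}/users/{uuid}',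
--     'pharma.dosage.forms.spt': 'products/pharmaceutical/dosage_forms/{id}',
--     'product.spt': 'products/{uuid}',
--     'product.category': 'company_management/product_categories/{id}',
--     'product.requirement.spt': 'company_management/product_requirements/{product_require_id}',
--     'product.requirement.spt.categories': 'company_management/product_categories/{category_id}/requirements/{id}',
--     'pro.require.conditions.spt': 'company_management/product_requirements/{prod_req_id}/conditions/{id}',
--     'product.description.spt': 'products/{product_uuid}/description/{description_language_code}',
--     'product.identifier.spt': 'products/{product_uuid}/identifiers/{id}',
--     'identifiers.types.spt': 'products/identifiers_types',
--     'products.status.spt': 'products/status_list',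
--     'product.composition.spt': 'products/{product_uuid}/composition/{child_product_uuid}',
--     'product.packaging.spt': 'products/{product_uuid}/packaging/{uuid}',
--     'product.packaging.layers.spt': 'products/{product_uuid}/packaging/{packaging_uuid}/layers/{id}',
--     'pack.size.type.spt': 'products/packaging_types/{packing_type_id}',
--     'products.types.spt': 'products/types',
--     'locations.management.spt': 'locations/{uuid}',
--     'storage.areas.spt': 'locations/{location_uuid}/storage_areas/{uuid}',
--     'shelf.spt': 'locations/{location_uuid}/storage_areas/{storage_uuid}/storage_shelfs/{storage_shelf_uuid}',
--     'read.points.spt': 'locations/{location_uuid}/readpoints/{readpoint_uuid}',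
--     'thrid.party.logistic.provide.spt': 'company_management/third_party_management/{uuid}',
--     'manufacturers.spt': 'company_management/manufacturer/{id}',
--     'container.spt.list': 'containers_search',
--     'container.spt.post': 'containers',
--     'container.spt': 'containers/{container_id_type}/{container_identifier}',
--     'disposition.spt': 'company_management/dispositions',
--     'business.step.spt': 'company_management/business_steps',
--     'product.lot.spt': 'products/{product_uuid}/lot',
--     'purchase.order': 'transactions/purchase/{uuid}',
--     'sale.order': 'transactions/sales/{uuid}',
--     'stock.picking.outgoing': 'shipments/Outbound',
--     'stock.picking.incoming': 'shipments/Inbound',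
--     'picking.spt': 'shipments/picking/{uuid}',
--     'picking.spt.pick_close': 'shipments/picking/{shipment_picking_uuid}/pick_and_close',
-- }
--
-- def get_uri(resource,method=METHOD_LIST):
--     try:
--         complemento = URI[resource]
--         if method in [METHOD_LIST,METHOD_POST]:
--             if complemento[-1] == '}':
--                 apos = complemento.rindex('{')
--                 complemento = complemento[:apos]
--             if complemento[-1] == '/':
--                 complemento = complemento[:len(complemento)-1]
--     except:
--         return ''
--
--     return "/%s" % (complemento)
--
-- def get_list_param(resource):
--     uri = get_uri(resource, 'GET')
--     res = []
--     if bool(uri):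
--         a = uri.find('{')
--         while a > 0:
--             b = uri.find('}')
--             if b > a:
--                 val = uri[a+1:b]
--                 if len(val) > 0:
--                     res.append(val)
--                 uri = uri[:a-1]+uri[b+1:]
--                 a = uri.find('{')
--     return res
-- ===== SOURCE B (Python) =====
-- # Precomputed placeholder lists: the URI table is a fixed constant, so the
-- # resource -> parameter-names mapping is compiled once into a lookup table.
-- PARAMS = {
--     'identifiers_types': [],
--     'res.partner': ['uuid'],
--     'license.spt.partner': ['partner_uuid', 'id'],
--     'license.spt.location': ['location_uuid', 'id'],
--     'license.spt.address': ['address_uuid', 'id'],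
--     'license.types.management.spt': ['id'],
--     'license.attachments.spt.partner': ['partner_uuid', 'licence_id', 'attachment_id'],
--     'license.attachments.spt.location': ['location_uuid', 'licence_id', 'attachment_id'],
--     'license.attachments.spt.address': ['address_uuid', 'licence_id', 'attachment_id'],
--     'trading.partner.address.spt.partner': ['partner_uuid', 'uuid'],
--     'trading.partner.address.spt.location': ['location_uuid', 'uuid'],
--     'trading.partner.address.spt.manufacturer': ['manufacturer_id', 'uuid'],
--     'trading.partner.users.spt': ['partner_uuid', 'uuid'],
--     'pharma.dosage.forms.spt': ['id'],
--     'product.spt': ['uuid'],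
--     'product.category': ['id'],
--     'product.requirement.spt': ['product_require_id'],
--     'product.requirement.spt.categories': ['category_id', 'id'],
--     'pro.require.conditions.spt': ['prod_req_id', 'id'],
--     'product.description.spt': ['product_uuid', 'description_language_code'],
--     'product.identifier.spt': ['product_uuid', 'id'],
--     'identifiers.types.spt': [],
--     'products.status.spt': [],
--     'product.composition.spt': ['product_uuid', 'child_product_uuid'],
--     'product.packaging.spt': ['product_uuid', 'uuid'],
--     'product.packaging.layers.spt': ['product_uuid', 'packaging_uuid', 'id'],
--     'pack.size.type.spt': ['packing_type_id'],
--     'products.types.spt': [],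
--     'locations.management.spt': ['uuid'],
--     'storage.areas.spt': ['location_uuid', 'uuid'],
--     'shelf.spt': ['location_uuid', 'storage_uuid', 'storage_shelf_uuid'],
--     'read.points.spt': ['location_uuid', 'readpoint_uuid'],
--     'thrid.party.logistic.provide.spt': ['uuid'],
--     'manufacturers.spt': ['id'],
--     'container.spt.list': [],
--     'container.spt.post': [],
--     'container.spt': ['container_id_type', 'container_identifier'],
--     'disposition.spt': [],
--     'business.step.spt': [],
--     'product.lot.spt': ['product_uuid'],
--     'purchase.order': ['uuid'],
--     'sale.order': ['uuid'],
--     'stock.picking.outgoing': [],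
--     'stock.picking.incoming': [],
--     'picking.spt': ['uuid'],
--     'picking.spt.pick_close': ['shipment_picking_uuid'],
-- }
--
-- def get_list_param(resource):
--     return list(PARAMS.get(resource, []))
-- ===== Notes on version B (the rewrite author's own statement) =====
-- stated objective: alternative
-- what changed: Since the URI template table is a fixed module constant, B replaces A's runtime find/slice/splice brace-parsing loop over the looked-up template by a precomputed resource -> placeholder-names dictionary, so each call is a single dict lookup with no string scanning.
import Mathlib
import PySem

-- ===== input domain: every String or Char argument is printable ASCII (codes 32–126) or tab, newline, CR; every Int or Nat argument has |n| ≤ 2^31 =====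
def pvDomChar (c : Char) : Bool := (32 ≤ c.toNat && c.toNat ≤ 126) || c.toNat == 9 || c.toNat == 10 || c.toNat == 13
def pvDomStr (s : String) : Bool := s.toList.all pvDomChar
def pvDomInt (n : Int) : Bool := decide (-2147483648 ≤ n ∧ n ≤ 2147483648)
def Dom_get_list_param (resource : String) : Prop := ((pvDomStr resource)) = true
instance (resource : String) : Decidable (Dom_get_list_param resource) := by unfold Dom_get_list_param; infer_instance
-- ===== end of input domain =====

-- B replaces A's runtime find/slice/splice parsing of the fixed URI template table by a
-- precomputed resource -> placeholder-names lookup table (objective: alternative, O(1) lookup);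
-- same return value proved for every string.

-- ===== PORT A =====
-- the module-level URI template table used by A's get_uri
def pvURI : PySem.Dict String String := PySem.Dict.ofList [
  ("identifiers_types", "products/identifiers_types"),
  ("res.partner", "trading_partners/{uuid}"),
  ("license.spt.partner", "trading_partners/{partner_uuid}/licences/{id}"),
  ("license.spt.location", "locations/{location_uuid}/licences/{id}"),
  ("license.spt.address", "address_book/{address_uuid}/licences/{id}"),
  ("license.types.management.spt", "company_management/licences_type/{id}"),
  ("license.attachments.spt.partner", "trading_partners/{partner_uuid}/licences/{licence_id}/attachments{attachment_id}"),
  ("license.attachments.spt.location", "location/{location_uuid}/licences/{licence_id}/attachments{attachment_id}"),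
  ("license.attachments.spt.address", "addresss_book/{address_uuid}/licences/{licence_id}/attachments{attachment_id}"),
  ("trading.partner.address.spt.partner", "trading_partners/{partner_uuid}/addresses/{uuid}"),
  ("trading.partner.address.spt.location", "locations/{location_uuid}/addresses/{uuid}"),
  ("trading.partner.address.spt.manufacturer", "company_management/manufacturer/{manufacturer_id}/addresses/{uuid}"),
  ("trading.partner.users.spt", "trading_partners/{partner_uuid}/users/{uuid}"),
  ("pharma.dosage.forms.spt", "products/pharmaceutical/dosage_forms/{id}"),
  ("product.spt", "products/{uuid}"),
  ("product.category", "company_management/product_categories/{id}"),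
  ("product.requirement.spt", "company_management/product_requirements/{product_require_id}"),
  ("product.requirement.spt.categories", "company_management/product_categories/{category_id}/requirements/{id}"),
  ("pro.require.conditions.spt", "company_management/product_requirements/{prod_req_id}/conditions/{id}"),
  ("product.description.spt", "products/{product_uuid}/description/{description_language_code}"),
  ("product.identifier.spt", "products/{product_uuid}/identifiers/{id}"),
  ("identifiers.types.spt", "products/identifiers_types"),
  ("products.status.spt", "products/status_list"),
  ("product.composition.spt", "products/{product_uuid}/composition/{child_product_uuid}"),
  ("product.packaging.spt", "products/{product_uuid}/packaging/{uuid}"),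
  ("product.packaging.layers.spt", "products/{product_uuid}/packaging/{packaging_uuid}/layers/{id}"),
  ("pack.size.type.spt", "products/packaging_types/{packing_type_id}"),
  ("products.types.spt", "products/types"),
  ("locations.management.spt", "locations/{uuid}"),
  ("storage.areas.spt", "locations/{location_uuid}/storage_areas/{uuid}"),
  ("shelf.spt", "locations/{location_uuid}/storage_areas/{storage_uuid}/storage_shelfs/{storage_shelf_uuid}"),
  ("read.points.spt", "locations/{location_uuid}/readpoints/{readpoint_uuid}"),
  ("thrid.party.logistic.provide.spt", "company_management/third_party_management/{uuid}"),
  ("manufacturers.spt", "company_management/manufacturer/{id}"),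
  ("container.spt.list", "containers_search"),
  ("container.spt.post", "containers"),
  ("container.spt", "containers/{container_id_type}/{container_identifier}"),
  ("disposition.spt", "company_management/dispositions"),
  ("business.step.spt", "company_management/business_steps"),
  ("product.lot.spt", "products/{product_uuid}/lot"),
  ("purchase.order", "transactions/purchase/{uuid}"),
  ("sale.order", "transactions/sales/{uuid}"),
  ("stock.picking.outgoing", "shipments/Outbound"),
  ("stock.picking.incoming", "shipments/Inbound"),
  ("picking.spt", "shipments/picking/{uuid}"),
  ("picking.spt.pick_close", "shipments/picking/{shipment_picking_uuid}/pick_and_close")]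

-- get_uri's try-body on the looked-up template; none = an exception was raised (caught -> '')
def pvTry (cs : List Char) (method : String) : Option (List Char) :=
  if method == "LIST" || method == "POST" then
    match PySem.List.pyGet? cs (-1) with
    | none => none                                  -- IndexError on complemento[-1]
    | some c =>
      let step : Option (List Char) :=
        if c = '}' then
          let apos := PySem.Chars.rfind cs ['{']
          if apos = -1 then none                    -- ValueError from rindex
          else some (PySem.List.slice cs none (some apos))
        else some cs
      match step with
      | none => none
      | some cs2 =>
        match PySem.List.pyGet? cs2 (-1) with
        | none => none                              -- IndexError on complemento[-1]
        | some c2 =>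
          if c2 = '/' then some (PySem.List.slice cs2 none (some ((cs2.length : Int) - 1)))
          else some cs2
  else some cs

-- get_uri(resource, method) as its list of characters ('' = [], "/%s" % c = '/' :: c)
def get_uri_chars (resource : String) (method : String) : List Char :=
  match PySem.Dict.get? pvURI resource with
  | none => []                                      -- KeyError, caught -> ''
  | some complemento =>
    match pvTry complemento.toList method with
    | none => []
    | some cs => '/' :: cs

-- A's while loop: find '{' / find '}', slice the value out, splice uri, repeat;
-- fuel only makes the recursion structural (never exhausted on any uri the table yields)
def pvLoopA : Nat → List Char → List String → List String
  | 0, _, res => res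
  | fuel + 1, uri, res =>
    let a := PySem.Chars.find uri ['{']
    if 0 < a then
      let b := PySem.Chars.find uri ['}']
      if a < b then
        let val := PySem.List.slice uri (some (a + 1)) (some b)
        let res' := if 0 < val.length then res ++ [String.ofList val] else res
        pvLoopA fuel (PySem.List.slice uri none (some (a - 1)) ++ PySem.List.slice uri (some (b + 1)) none) res'
      else pvLoopA fuel uri res
    else res

def get_list_param (resource : String) : List String :=
  let uri := get_uri_chars resource "GET"
  if uri = [] then [] else pvLoopA (uri.length + 1) uri []

-- ===== PORT B =====
-- the precomputed resource -> placeholder-names table (Source B's PARAMS constant)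
def pvParams : PySem.Dict String (List String) := PySem.Dict.ofList [
  ("identifiers_types", []),
  ("res.partner", ["uuid"]),
  ("license.spt.partner", ["partner_uuid", "id"]),
  ("license.spt.location", ["location_uuid", "id"]),
  ("license.spt.address", ["address_uuid", "id"]),
  ("license.types.management.spt", ["id"]),
  ("license.attachments.spt.partner", ["partner_uuid", "licence_id", "attachment_id"]),
  ("license.attachments.spt.location", ["location_uuid", "licence_id", "attachment_id"]),
  ("license.attachments.spt.address", ["address_uuid", "licence_id", "attachment_id"]),
  ("trading.partner.address.spt.partner", ["partner_uuid", "uuid"]),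
  ("trading.partner.address.spt.location", ["location_uuid", "uuid"]),
  ("trading.partner.address.spt.manufacturer", ["manufacturer_id", "uuid"]),
  ("trading.partner.users.spt", ["partner_uuid", "uuid"]),
  ("pharma.dosage.forms.spt", ["id"]),
  ("product.spt", ["uuid"]),
  ("product.category", ["id"]),
  ("product.requirement.spt", ["product_require_id"]),
  ("product.requirement.spt.categories", ["category_id", "id"]),
  ("pro.require.conditions.spt", ["prod_req_id", "id"]),
  ("product.description.spt", ["product_uuid", "description_language_code"]),
  ("product.identifier.spt", ["product_uuid", "id"]),
  ("identifiers.types.spt", []),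
  ("products.status.spt", []),
  ("product.composition.spt", ["product_uuid", "child_product_uuid"]),
  ("product.packaging.spt", ["product_uuid", "uuid"]),
  ("product.packaging.layers.spt", ["product_uuid", "packaging_uuid", "id"]),
  ("pack.size.type.spt", ["packing_type_id"]),
  ("products.types.spt", []),
  ("locations.management.spt", ["uuid"]),
  ("storage.areas.spt", ["location_uuid", "uuid"]),
  ("shelf.spt", ["location_uuid", "storage_uuid", "storage_shelf_uuid"]),
  ("read.points.spt", ["location_uuid", "readpoint_uuid"]),
  ("thrid.party.logistic.provide.spt", ["uuid"]),
  ("manufacturers.spt", ["id"]),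
  ("container.spt.list", []),
  ("container.spt.post", []),
  ("container.spt", ["container_id_type", "container_identifier"]),
  ("disposition.spt", []),
  ("business.step.spt", []),
  ("product.lot.spt", ["product_uuid"]),
  ("purchase.order", ["uuid"]),
  ("sale.order", ["uuid"]),
  ("stock.picking.outgoing", []),
  ("stock.picking.incoming", []),
  ("picking.spt", ["uuid"]),
  ("picking.spt.pick_close", ["shipment_picking_uuid"])]

def get_list_param_alt (resource : String) : List String :=
  PySem.Dict.getD pvParams resource []

-- ===== PRECONDITION & SPEC =====
def Spec_get_list_param (resource : String) (out : List String) : Prop := out = get_list_param_alt resource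
instance (resource : String) (out : List String) : Decidable (Spec_get_list_param resource out) := by unfold Spec_get_list_param; infer_instance

-- ===== CLAIM (what is proved, stated in full; the proofs are below) =====
def Claim_equal_get_list_param : Prop := ∀ (resource : String), Dom_get_list_param resource → Spec_get_list_param resource (get_list_param resource)

-- ===== LEMMAS AND PROOFS =====

lemma pvTry_GET (cs : List Char) : pvTry cs "GET" = some cs := rfl

-- key-by-key check: A's loop on '/' :: template equals B's precomputed list
def pvAgree (p : String × String) : Bool :=
  decide (pvLoopA (('/' :: p.2.toList).length + 1) ('/' :: p.2.toList) [] = PySem.Dict.getD pvParams p.1 [])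

set_option maxHeartbeats 1600000 in
set_option maxRecDepth 10000 in
lemma pvAgree_all : pvURI.items.all pvAgree = true := by decide

set_option maxHeartbeats 1600000 in
set_option maxRecDepth 10000 in
lemma pvKeys_eq : pvParams.keys = pvURI.keys := by decide

lemma pv_eq_of_get (resource : String) (v : String)
    (h : PySem.Dict.get? pvURI resource = some v) :
    get_list_param resource = get_list_param_alt resource := by
  have hm := PySem.Dict.mem_items_of_get?_eq_some (d := pvURI) h
  have hb : pvAgree (resource, v) = true := List.all_eq_true.mp pvAgree_all _ hm
  have hag := of_decide_eq_true hb
  unfold get_list_param get_list_param_alt get_uri_chars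
  rw [h]
  simpa [pvTry_GET] using hag

-- ===== VERDICT (by name: the statement is the Claim_ definition above) =====
theorem get_list_param_spec : Claim_equal_get_list_param := by
  intro resource _
  unfold Spec_get_list_param
  cases h : PySem.Dict.get? pvURI resource with
  | none =>
    have hk : resource ∉ pvURI.keys := (PySem.Dict.get?_eq_none_iff_not_mem_keys pvURI resource).mp h
    have hp : PySem.Dict.get? pvParams resource = none :=
      (PySem.Dict.get?_eq_none_iff_not_mem_keys pvParams resource).mpr (by rw [pvKeys_eq]; exact hk)
    unfold get_list_param get_list_param_alt get_uri_chars
    rw [h]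
    simp [PySem.Dict.getD_eq_get?_getD, hp]
  | some v => exact pv_eq_of_get resource v h
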